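-- pv_equiv track=rewrite | github.com/FernandoIzidio/Python-Standard | conceitos_e_exercicios/duplicata.py | find_double
-- ===== SOURCE A (Python) =====
-- def find_double(iterable):
--     check = set()
--     ocurrence = 0
--     for item in iterable:
--         if item in check:
--             ocurrence += 1
--         check.add(item)
--
--     return ocurrence
-- ===== SOURCE B (Python) =====
-- def find_double(iterable):
--     items = sorted(iterable)
--     return sum(1 for a, b in zip(items, items[1:]) if a == b)
-- ===== Notes on version B (the rewrite author's own statement) =====
-- stated objective: alternative
-- what changed: Replaces the hash-set membership loop by sorting the items and counting adjacent equal pairs, which equals the number of duplicate occurrences.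
import Mathlib
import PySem

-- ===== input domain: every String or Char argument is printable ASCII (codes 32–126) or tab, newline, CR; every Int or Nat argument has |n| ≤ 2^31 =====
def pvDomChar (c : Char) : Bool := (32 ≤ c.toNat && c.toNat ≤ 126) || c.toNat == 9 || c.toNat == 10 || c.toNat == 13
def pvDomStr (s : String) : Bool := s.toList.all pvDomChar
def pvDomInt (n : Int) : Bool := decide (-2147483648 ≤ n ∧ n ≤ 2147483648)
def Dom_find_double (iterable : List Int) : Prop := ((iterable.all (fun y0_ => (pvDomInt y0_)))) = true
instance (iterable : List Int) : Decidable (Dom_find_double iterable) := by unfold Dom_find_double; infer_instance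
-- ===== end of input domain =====

-- B sorts the items and counts adjacent equal pairs instead of A's hash-set membership loop; objective: alternative.

-- ===== PORT A =====
def find_double (iterable : List Int) : Int :=
  (iterable.foldl
    (fun st item =>
      (PySem.Set.add st.1 item, if PySem.Set.contains st.1 item then st.2 + 1 else st.2))
    ((PySem.Set.empty : PySem.Set Int), (0 : Int))).2

-- ===== PORT B =====
def find_double_alt (iterable : List Int) : Int :=
  let items := PySem.List.sorted iterable (fun x => x) false
  -- sum(1 for a, b in zip(items, items[1:]) if a == b)
  (((items.zip (PySem.List.slice items (some (1 : Int)) none)).filter (fun p => p.1 == p.2)).length : Int)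

-- ===== PRECONDITION & SPEC =====
def Spec_find_double (iterable : List Int) (out : Int) : Prop := out = find_double_alt iterable
instance (iterable : List Int) (out : Int) : Decidable (Spec_find_double iterable out) := by unfold Spec_find_double; infer_instance

-- ===== CLAIM (what is proved, stated in full; the proofs are below) =====
def Claim_equal_find_double : Prop := ∀ (iterable : List Int), Dom_find_double iterable → Spec_find_double iterable (find_double iterable)

-- ===== LEMMAS AND PROOFS =====

-- Loop invariant for A: the counter ends at occ + (#items consumed) - (#new distinct elements added to check).
theorem find_double_loop (xs : List Int) (check : PySem.Set Int) (occ : Int) :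
    (xs.foldl
      (fun st item =>
        (PySem.Set.add st.1 item, if PySem.Set.contains st.1 item then st.2 + 1 else st.2))
      (check, occ)).2
    = occ + (xs.length : Int) - ((PySem.Set.update check xs).length : Int) + (check.length : Int) := by
  induction xs generalizing check occ with
  | nil => simp [PySem.Set.update]
  | cons x xs ih =>
    by_cases h : x ∈ check
    · have hc : PySem.Set.contains check x = true := by
        simp [PySem.Set.contains, h]
      have hadd : PySem.Set.add check x = check := by
        simp [PySem.Set.add, h]
      simp only [List.foldl_cons, hc, if_true]
      rw [ih]
      simp [PySem.Set.update, hadd]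
      ring
    · have hc : PySem.Set.contains check x = false := by
        simp [PySem.Set.contains, h]
      have hadd : PySem.Set.add check x = check ++ [x] := by
        simp [PySem.Set.add, h]
      simp only [List.foldl_cons, hc]
      rw [ih]
      simp [PySem.Set.update, hadd]
      ring

-- In a nondecreasing list, (#adjacent equal pairs) + (#distinct elements) = length.
theorem adj_add_card (ys : List Int) (h : ys.Pairwise (· ≤ ·)) :
    ((ys.zip ys.tail).filter (fun p => p.1 == p.2)).length + ys.toFinset.card
      = ys.length := by
  induction ys with
  | nil => simp
  | cons a t ih =>
    cases t with
    | nil => simp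
    | cons b u =>
      have h' : (b :: u).Pairwise (· ≤ ·) := h.tail
      have hab : a ≤ b := (List.pairwise_cons.mp h).1 b (by simp)
      have ihr := ih h'
      by_cases hEq : a = b
      · subst hEq
        have hfs : (a :: a :: u).toFinset = (a :: u).toFinset := by simp
        simp only [List.tail_cons, List.zip_cons_cons, List.filter_cons, beq_self_eq_true,
          if_true, List.length_cons, hfs] at ihr ⊢
        omega
      · have hnot : a ∉ (b :: u).toFinset := by
          simp only [List.mem_toFinset, List.mem_cons]
          rintro (rfl | hu)
          · exact hEq rfl
          · have hbu : b ≤ a := (List.pairwise_cons.mp h').1 a hu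
            exact hEq (le_antisymm hab hbu)
        have hfs : (a :: b :: u).toFinset.card = (b :: u).toFinset.card + 1 := by
          rw [List.toFinset_cons, Finset.card_insert_of_notMem (by simpa using hnot)]
        have hne : (a == b) = false := by simp [hEq]
        simp only [List.tail_cons, List.zip_cons_cons, List.filter_cons, hne,
          Bool.false_eq_true, if_false, List.length_cons, hfs] at ihr ⊢
        omega

-- The length of set(xs) (first occurrences) is the number of distinct elements.
theorem ofList_length_eq_card (xs : List Int) :
    (PySem.Set.ofList xs).length = xs.toFinset.card := by
  have hnd : (PySem.Set.ofList xs).Nodup := PySem.Set.nodup_ofList xs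
  have hfs : (PySem.Set.ofList xs).toFinset = xs.toFinset := by
    ext v
    simp [List.mem_toFinset, PySem.Set.mem_ofList]
  calc (PySem.Set.ofList xs).length = (PySem.Set.ofList xs).toFinset.card :=
        (List.toFinset_card_of_nodup hnd).symm
    _ = xs.toFinset.card := by rw [hfs]

-- ===== VERDICT (by name: the statement is the Claim_ definition above) =====
theorem find_double_spec : Claim_equal_find_double := by
  intro xs _
  unfold Spec_find_double find_double find_double_alt
  rw [find_double_loop]
  have hupd : PySem.Set.update (PySem.Set.empty : PySem.Set Int) xs = PySem.Set.ofList xs := by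
    simp [PySem.Set.update, PySem.Set.ofList, PySem.Set.empty]
  rw [hupd]
  set ys := PySem.List.sorted xs (fun x => x) false with hys
  have hperm : ys.Perm xs := PySem.List.sorted_perm xs (fun x => x) false
  have hsorted : ys.Pairwise (· ≤ ·) := by
    have := PySem.List.sorted_pairwise xs (fun x => x)
    simpa [hys] using this
  have hslice : PySem.List.slice ys (some (1 : Int)) none = ys.tail :=
    PySem.List.slice_from_one ys
  dsimp only
  rw [hslice]
  have hadj := adj_add_card ys hsorted
  have hlen : ys.length = xs.length := hperm.length_eq
  have hcard : ys.toFinset.card = xs.toFinset.card := by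
    have : ys.toFinset = xs.toFinset := by
      ext v; simp [List.mem_toFinset, hperm.mem_iff]
    rw [this]
  have hset := ofList_length_eq_card xs
  simp only [PySem.Set.empty, List.length_nil]
  omega
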